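-- pv_equiv track=rewrite | github.com/SanyaSriv/Hierarchical_Coherence_VN | attempt_3/topology_analysis.py | make_links
-- ===== SOURCE A (Python) =====
-- def make_links(graph):
--     """
--     Function to assign a unique link for every connection in the graph.
--     """
--     global_number = 0
--     link_dict = {}
--     for i in graph:
--         for j in graph[i]:
--             if (i, j) in link_dict:
--                 continue
--             else:
--                 link_dict[(i, j)] = "l{}".format(global_number)
--                 global_number += 1
--     return link_dict
-- ===== SOURCE B (Python) =====
-- def make_links(graph):
--     remaining = [(i, j) for i in graph for j in graph[i]]
--     link_dict = {}
--     label = 0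
--     while remaining:
--         head = remaining[0]
--         link_dict[head] = "l{}".format(label)
--         label += 1
--         remaining = [e for e in remaining if e != head]
--     return link_dict
-- ===== Notes on version B (the rewrite author's own statement) =====
-- stated objective: alternative
-- what changed: Replaces A's single pass with a seen-dict membership test and running counter by a worklist sieve: flatten all edges once, then repeatedly label the head of the remaining worklist and filter every duplicate of it out of the worklist, so no membership test against accumulated state is ever made.
import Mathlib
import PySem

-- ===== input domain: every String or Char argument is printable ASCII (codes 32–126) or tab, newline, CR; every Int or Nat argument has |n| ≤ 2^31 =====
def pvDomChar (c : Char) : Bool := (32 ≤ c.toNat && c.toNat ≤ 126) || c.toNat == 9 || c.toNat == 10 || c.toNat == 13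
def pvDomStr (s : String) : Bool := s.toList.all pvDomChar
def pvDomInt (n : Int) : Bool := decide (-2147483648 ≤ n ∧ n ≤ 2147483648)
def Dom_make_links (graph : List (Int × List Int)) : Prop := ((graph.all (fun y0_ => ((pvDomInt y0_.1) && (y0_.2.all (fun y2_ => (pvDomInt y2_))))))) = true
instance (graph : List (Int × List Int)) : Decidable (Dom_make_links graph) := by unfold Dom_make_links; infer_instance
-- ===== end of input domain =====

-- B replaces A's seen-dict membership test + counter pass by a worklist sieve: label the head
-- of the remaining edge list, filter all its duplicates out, repeat (objective: alternative).

-- ===== PORT A =====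
-- A receives a Python dict; the assoc-list argument is turned into one (PySem.Dict.ofList) first, in both ports.
def make_links (graph : List (Int × List Int)) : List (Int × Int × String) :=
  let d := PySem.Dict.ofList graph
  let st := d.items.foldl
    (fun (st : PySem.Dict (Int × Int) String × Int) p =>
      (PySem.Dict.getD d p.1 []).foldl
        (fun (st : PySem.Dict (Int × Int) String × Int) j =>
          if st.1.contains (p.1, j) then st
          else (st.1.insert (p.1, j) ("l" ++ PySem.Int.toStr st.2), st.2 + 1)) st)
    (PySem.Dict.empty, 0)
  st.1.items.map (fun q => (q.1.1, q.1.2, q.2))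

-- ===== PORT B =====
-- B's while-loop: take the head of the remaining worklist, give it the next label,
-- filter every copy of it out of the worklist, continue.
def pvLoop : List (Int × Int) → PySem.Dict (Int × Int) String → Int → PySem.Dict (Int × Int) String
  | [], out, _ => out
  | h :: t, out, n =>
      pvLoop ((h :: t).filter (fun e => decide (e ≠ h))) (out.insert h ("l" ++ PySem.Int.toStr n)) (n + 1)
termination_by es _ _ => es.length
decreasing_by
  simp only [List.filter_cons, decide_not, ne_eq]
  simp only [decide_true, Bool.not_true]
  exact Nat.lt_succ_of_le (List.length_filter_le _ t)

def make_links_alt (graph : List (Int × List Int)) : List (Int × Int × String) :=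
  let d := PySem.Dict.ofList graph
  let remaining := d.items.flatMap (fun p => (PySem.Dict.getD d p.1 []).map (fun j => (p.1, j)))
  (pvLoop remaining PySem.Dict.empty 0).items.map (fun q => (q.1.1, q.1.2, q.2))

-- ===== PRECONDITION & SPEC =====
def Spec_make_links (graph : List (Int × List Int)) (out : List (Int × Int × String)) : Prop := out = make_links_alt graph
instance (graph : List (Int × List Int)) (out : List (Int × Int × String)) : Decidable (Spec_make_links graph out) := by unfold Spec_make_links; infer_instance

-- ===== CLAIM (what is proved, stated in full; the proofs are below) =====
def Claim_equal_make_links : Prop := ∀ (graph : List (Int × List Int)), Dom_make_links graph → Spec_make_links graph (make_links graph)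

-- ===== LEMMAS AND PROOFS =====

-- A's loop body, on a single flattened edge
def pvStep (st : PySem.Dict (Int × Int) String × Int) (e : Int × Int) :
    PySem.Dict (Int × Int) String × Int :=
  if st.1.contains e then st
  else (st.1.insert e ("l" ++ PySem.Int.toStr st.2), st.2 + 1)

-- ordered dedup of es relative to an already-seen list (common yardstick of both proofs)
def pvSeenDedup (seen : List (Int × Int)) : List (Int × Int) → List (Int × Int)
  | [] => []
  | e :: es => if e ∈ seen then pvSeenDedup seen es else e :: pvSeenDedup (seen ++ [e]) es

theorem pvMain (es : List (Int × Int)) (d : PySem.Dict (Int × Int) String)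
    (hnd : d.keys.Nodup) :
    (es.foldl pvStep (d, (d.size : Int))).1.items
      = d.items ++ (PySem.List.enumerate (pvSeenDedup d.keys es) (d.size : Int)).map
          (fun q => (q.2, "l" ++ PySem.Int.toStr q.1)) := by
  induction es generalizing d with
  | nil => simp [pvSeenDedup]
  | cons e es ih =>
    by_cases h : d.contains e
    · have hm : e ∈ d.keys := (PySem.Dict.contains_iff_mem_keys d e).1 h
      simp only [List.foldl_cons, pvStep, h, pvSeenDedup, hm, if_pos]
      exact ih d hnd
    · have hb : d.contains e = false := by simpa using h
      have hm : e ∉ d.keys := fun hmem => h ((PySem.Dict.contains_iff_mem_keys d e).2 hmem)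
      have hstep : pvStep (d, (d.size : Int)) e
          = (d.insert e ("l" ++ PySem.Int.toStr (d.size : Int)), (d.size : Int) + 1) := by
        simp [pvStep, hb]
      have hsz : ((d.insert e ("l" ++ PySem.Int.toStr (d.size : Int))).size : Int)
          = (d.size : Int) + 1 := by
        rw [PySem.Dict.size_insert]; simp [hb]
      have ih' := ih (d.insert e ("l" ++ PySem.Int.toStr (d.size : Int)))
        (PySem.Dict.nodup_keys_insert d e _ hnd)
      rw [hsz] at ih'
      rw [List.foldl_cons, hstep, ih',
        PySem.Dict.items_insert_of_not_contains d _ hb,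
        PySem.Dict.keys_insert_of_not_contains d _ hb]
      simp only [pvSeenDedup]
      rw [if_neg hm, PySem.List.enumerate_cons]
      simp

-- seen-relative dedup is plain dedup of the worklist with the seen elements filtered out
theorem pvG (N : Nat) : ∀ es : List (Int × Int), es.length ≤ N → ∀ seen,
    pvSeenDedup seen es = pvSeenDedup [] (es.filter (fun e => decide (e ∉ seen))) := by
  induction N with
  | zero =>
    intro es hlen seen
    have : es = [] := List.eq_nil_of_length_eq_zero (Nat.le_zero.mp hlen)
    simp [this, pvSeenDedup]
  | succ N ih =>
    intro es hlen seen
    cases es with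
    | nil => simp [pvSeenDedup]
    | cons e es =>
      have hle : es.length ≤ N := by simpa using hlen
      by_cases h : e ∈ seen
      · simp only [pvSeenDedup, List.filter_cons, h]
        simp only [not_true_eq_false, decide_false]
        exact ih es hle seen
      · simp only [pvSeenDedup, List.filter_cons, h]
        simp only [not_false_eq_true, decide_true, if_true]
        rw [show pvSeenDedup [] (e :: es.filter (fun x => decide (x ∉ seen)))
              = e :: pvSeenDedup [e] (es.filter (fun x => decide (x ∉ seen))) by
            simp [pvSeenDedup]]
        rw [ih es hle (seen ++ [e]),
            ih (es.filter (fun x => decide (x ∉ seen)))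
              (le_trans (List.length_filter_le _ es) hle) [e],
            List.filter_filter]
        rw [if_neg not_false]
        congr 2
        apply List.filter_congr
        intro x _
        simp [List.mem_append]
        exact Bool.and_comm _ _

-- B's sieve produces exactly the enumerated ordered-dedup of the worklist
theorem pvB (N : Nat) : ∀ es : List (Int × Int), es.length ≤ N →
    ∀ (out : PySem.Dict (Int × Int) String) (n : Int),
    (∀ e ∈ es, out.contains e = false) →
    (pvLoop es out n).items
      = out.items ++ (PySem.List.enumerate (pvSeenDedup [] es) n).map
          (fun q => (q.2, "l" ++ PySem.Int.toStr q.1)) := by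
  induction N with
  | zero =>
    intro es hlen out n _
    have : es = [] := List.eq_nil_of_length_eq_zero (Nat.le_zero.mp hlen)
    simp [this, pvLoop, pvSeenDedup]
  | succ N ih =>
    intro es hlen out n H
    cases es with
    | nil => simp [pvLoop, pvSeenDedup]
    | cons h t =>
      have hle : t.length ≤ N := by simpa using hlen
      have hfilter : (h :: t).filter (fun e => decide (e ≠ h))
          = t.filter (fun e => decide (e ≠ h)) := by
        simp
      have hcont : out.contains h = false := H h (by simp)
      have H' : ∀ e ∈ t.filter (fun e => decide (e ≠ h)),
          (out.insert h ("l" ++ PySem.Int.toStr n)).contains e = false := by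
        intro e he
        have hne : e ≠ h := by
          have := List.of_mem_filter he
          simpa using this
        have hmem : e ∈ t := List.mem_of_mem_filter he
        rw [PySem.Dict.contains_insert]
        simp [hne, H e (by simp [hmem])]
      have ihr := ih (t.filter (fun e => decide (e ≠ h)))
        (le_trans (List.length_filter_le _ t) hle)
        (out.insert h ("l" ++ PySem.Int.toStr n)) (n + 1) H'
      rw [pvLoop, hfilter, ihr,
          PySem.Dict.items_insert_of_not_contains out _ hcont]
      have hdd : pvSeenDedup [] (h :: t)
          = h :: pvSeenDedup [] (t.filter (fun e => decide (e ≠ h))) := by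
        have hg := pvG t.length t le_rfl [h]
        have h1 : pvSeenDedup ([] : List (Int × Int)) (h :: t) = h :: pvSeenDedup [h] t := by
          simp [pvSeenDedup]
        rw [h1, hg]
        congr 1
        congr 1
        apply List.filter_congr
        intro x _
        simp
      rw [hdd, PySem.List.enumerate_cons]
      simp

theorem make_links_spec_aux (graph : List (Int × List Int)) :
    make_links graph = make_links_alt graph := by
  unfold make_links make_links_alt
  dsimp only
  set d := PySem.Dict.ofList graph with hd
  set es := d.items.flatMap (fun p => (PySem.Dict.getD d p.1 []).map (fun j => (p.1, j))) with hes
  have hnest : d.items.foldl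
      (fun (st : PySem.Dict (Int × Int) String × Int) p =>
        (PySem.Dict.getD d p.1 []).foldl
          (fun (st : PySem.Dict (Int × Int) String × Int) j =>
            if st.1.contains (p.1, j) then st
            else (st.1.insert (p.1, j) ("l" ++ PySem.Int.toStr st.2), st.2 + 1)) st)
      (PySem.Dict.empty, 0)
      = es.foldl pvStep (PySem.Dict.empty, 0) := by
    rw [hes, List.foldl_flatMap]
    simp [List.foldl_map, pvStep]
  rw [hnest]
  have h0 : ((PySem.Dict.empty : PySem.Dict (Int × Int) String).size : Int) = 0 := by
    simp [PySem.Dict.size_empty]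
  have hmain := pvMain es (PySem.Dict.empty) (by simp [PySem.Dict.keys_empty])
  rw [h0, PySem.Dict.keys_empty] at hmain
  have hB := pvB es.length es le_rfl PySem.Dict.empty 0
    (by intro e _; simp [PySem.Dict.contains_empty])
  rw [hmain, hB]

-- ===== VERDICT (by name: the statement is the Claim_ definition above) =====
theorem make_links_spec : Claim_equal_make_links := by
  intro graph _
  unfold Spec_make_links
  exact make_links_spec_aux graph
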